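-- pv_equiv track=rewrite | github.com/AncientNLP/potnia | potnia/hittite.py | tokenize_transliteration
-- ===== SOURCE A (Python) =====
-- def tokenize_transliteration(input_string:str) -> list[str]:
--     tokens = []
--     token = ""
--     i = 0
--
--     while i < len(input_string):
--         char = input_string[i]
--
--         # Handle characters ']', '[', and ' '
--         if char in '[] ':
--             if token:
--                 tokens.append(token)
--                 token = ""
--             tokens.append(char)
--         # Handle other characters
--         elif char in ['-','‑']:
--             if token:
--                 tokens.append(token)
--                 token = ""
--         else:
--             token += char
--         i += 1
--
--     # Add the last token if it exists
--     if token: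
--         tokens.append(token)
--
--     return tokens
-- ===== SOURCE B (Python) =====
-- def tokenize_transliteration(input_string: str) -> list[str]:
--     tokens = []
--     i, n = 0, len(input_string)
--     while i < n:
--         c = input_string[i]
--         if c in '[] ':
--             tokens.append(c)
--             i += 1
--         elif c in '-\u2011':
--             i += 1
--         else:
--             # take the maximal run of plain text characters as one token
--             j = i + 1
--             while j < n and input_string[j] not in '[] -\u2011':
--                 j += 1
--             tokens.append(input_string[i:j])
--             i = j
--     return tokens
-- ===== Notes on version B (the rewrite author's own statement) =====
-- stated objective: alternative
-- what changed: Replaces A's character-by-character accumulator (buffer flushed on every delimiter) with a two-pointer scan that slices each maximal run of plain-text characters out as one token, so no incremental token string is ever built.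
import Mathlib
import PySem

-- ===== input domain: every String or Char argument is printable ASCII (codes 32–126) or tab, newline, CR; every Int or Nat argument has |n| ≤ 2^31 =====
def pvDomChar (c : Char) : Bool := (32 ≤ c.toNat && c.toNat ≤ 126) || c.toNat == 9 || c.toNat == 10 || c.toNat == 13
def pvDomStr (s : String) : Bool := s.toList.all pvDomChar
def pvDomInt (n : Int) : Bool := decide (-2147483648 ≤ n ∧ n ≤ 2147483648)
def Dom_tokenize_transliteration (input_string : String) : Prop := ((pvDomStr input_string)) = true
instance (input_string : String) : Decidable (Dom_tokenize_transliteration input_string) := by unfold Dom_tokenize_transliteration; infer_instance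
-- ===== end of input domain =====

-- B replaces A's char-by-char accumulator with a two-pointer scan slicing out each
-- maximal run of plain-text characters as one token (same output, same O(n) cost).

-- ===== PORT A =====
-- A's `token` string buffer is modelled as a List Char (appended at the end, as `token += char`);
-- a finished token becomes `String.mk token` exactly where A appends it to `tokens`.
def pvLoopA : List Char → List String → List Char → List String
  | [], tokens, token => if token ≠ [] then tokens ++ [String.mk token] else tokens
  | c :: rest, tokens, token =>
    if c = '[' ∨ c = ']' ∨ c = ' ' then
      pvLoopA rest ((if token ≠ [] then tokens ++ [String.mk token] else tokens) ++ [String.mk [c]]) []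
    else if c = '-' ∨ c = '‑' then
      pvLoopA rest (if token ≠ [] then tokens ++ [String.mk token] else tokens) []
    else
      pvLoopA rest tokens (token ++ [c])

def tokenize_transliteration (input_string : String) : List String :=
  pvLoopA input_string.toList [] []

-- ===== PORT B =====
-- a character that is neither a bracket/space nor a hyphen (the inner while's condition)
def pvIsText (c : Char) : Bool := !(c = '[' || c = ']' || c = ' ' || c = '-' || c = '‑')

def pvLoopB : List Char → List String
  | [] => []
  | c :: rest =>
    if c = '[' ∨ c = ']' ∨ c = ' ' then
      String.mk [c] :: pvLoopB rest
    else if c = '-' ∨ c = '‑' then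
      pvLoopB rest
    else
      -- slice input_string[i:j] where j is the end of the maximal text run
      String.mk (c :: rest.takeWhile pvIsText) :: pvLoopB (rest.dropWhile pvIsText)
termination_by cs => cs.length
decreasing_by
  · simp
  · simp
  · have := List.length_dropWhile_le pvIsText rest; simp; omega

def tokenize_transliteration_alt (input_string : String) : List String :=
  pvLoopB input_string.toList

-- ===== PRECONDITION & SPEC =====
def Spec_tokenize_transliteration (input_string : String) (out : List String) : Prop := out = tokenize_transliteration_alt input_string
instance (input_string : String) (out : List String) : Decidable (Spec_tokenize_transliteration input_string out) := by unfold Spec_tokenize_transliteration; infer_instance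

-- ===== CLAIM (what is proved, stated in full; the proofs are below) =====
def Claim_equal_tokenize_transliteration : Prop := ∀ (input_string : String), Dom_tokenize_transliteration input_string → Spec_tokenize_transliteration input_string (tokenize_transliteration input_string)

-- ===== LEMMAS AND PROOFS =====

lemma pvLoopB_delim (c : Char) (rest : List Char) (h1 : c = '[' ∨ c = ']' ∨ c = ' ') :
    pvLoopB (c :: rest) = String.mk [c] :: pvLoopB rest := by
  rw [pvLoopB, if_pos h1]

lemma pvLoopB_hyphen (c : Char) (rest : List Char) (h1 : ¬(c = '[' ∨ c = ']' ∨ c = ' '))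
    (h2 : c = '-' ∨ c = '‑') : pvLoopB (c :: rest) = pvLoopB rest := by
  rw [pvLoopB, if_neg h1, if_pos h2]

-- flush a pending buffer in front of a token list
def pvFlush (token : List Char) (l : List String) : List String :=
  if token = [] then l else String.mk token :: l

lemma pvLoopB_norm (cs : List Char) :
    pvLoopB cs = pvFlush (cs.takeWhile pvIsText) (pvLoopB (cs.dropWhile pvIsText)) := by
  cases cs with
  | nil => simp [pvLoopB, pvFlush]
  | cons c rest =>
    by_cases h1 : c = '[' ∨ c = ']' ∨ c = ' '
    · have ht : pvIsText c = false := by rcases h1 with h|h|h <;> simp [pvIsText, h]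
      simp [pvLoopB, h1, List.takeWhile, List.dropWhile, ht, pvFlush]
    · by_cases h2 : c = '-' ∨ c = '‑'
      · have ht : pvIsText c = false := by rcases h2 with h|h <;> simp [pvIsText, h]
        simp [pvLoopB, h1, h2, List.takeWhile, List.dropWhile, ht, pvFlush]
      · have ht : pvIsText c = true := by
          simp [pvIsText]
          push_neg at h1 h2
          tauto
        simp [pvLoopB, h1, h2, List.takeWhile, List.dropWhile, ht, pvFlush]

lemma pvLoopA_eq (cs : List Char) : ∀ (tokens : List String) (token : List Char),
    pvLoopA cs tokens token =
      tokens ++ pvFlush (token ++ cs.takeWhile pvIsText) (pvLoopB (cs.dropWhile pvIsText)) := by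
  induction cs with
  | nil =>
    intro tokens token
    by_cases h : token = [] <;> simp [pvLoopA, pvFlush, h, pvLoopB]
  | cons c rest ih =>
    intro tokens token
    by_cases h1 : c = '[' ∨ c = ']' ∨ c = ' '
    · have ht : pvIsText c = false := by rcases h1 with h|h|h <;> simp [pvIsText, h]
      rw [pvLoopA, if_pos h1, ih]
      simp only [List.nil_append]
      rw [← pvLoopB_norm rest]
      by_cases h : token = [] <;>
        simp [List.takeWhile, List.dropWhile, ht, pvFlush, h, pvLoopB_delim c rest h1]
    · by_cases h2 : c = '-' ∨ c = '‑'
      · have ht : pvIsText c = false := by rcases h2 with h|h <;> simp [pvIsText, h]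
        rw [pvLoopA, if_neg h1, if_pos h2, ih]
        simp only [List.nil_append]
        rw [← pvLoopB_norm rest]
        by_cases h : token = [] <;>
          simp [List.takeWhile, List.dropWhile, ht, pvFlush, h, pvLoopB_hyphen c rest h1 h2]
      · have ht : pvIsText c = true := by
          simp [pvIsText]
          push_neg at h1 h2
          tauto
        rw [pvLoopA, if_neg h1, if_neg h2, ih]
        simp [List.takeWhile, List.dropWhile, ht, pvFlush]

-- ===== VERDICT (by name: the statement is the Claim_ definition above) =====
theorem tokenize_transliteration_spec : Claim_equal_tokenize_transliteration := by
  intro s _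
  unfold Spec_tokenize_transliteration tokenize_transliteration tokenize_transliteration_alt
  rw [pvLoopA_eq]
  simp only [List.nil_append]
  rw [← pvLoopB_norm]
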